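-- pv_equiv track=rewrite | github.com/peter/learning | languages/python/examples/lib/qualified.py | maskify1
-- ===== SOURCE A (Python) =====
-- def maskify1(cc):
--   MASK_CHAR = '#'
--   START_LENGTH = 1
--   END_LENGTH = 4
--   MIN_LENGTH = START_LENGTH + END_LENGTH + 1
--   if len(cc) < MIN_LENGTH:
--     return cc
--   mask_range = range(START_LENGTH, (len(cc) - END_LENGTH))
--   def should_mask(i, c):
--     return c.isdigit() and i in mask_range
--   result = ''
--   for i, c in enumerate(cc):
--     result += MASK_CHAR if should_mask(i, c) else c
--   return result
-- ===== SOURCE B (Python) =====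
-- def maskify1(cc):
--   if len(cc) < 6:
--     return cc
--   middle = ''.join('#' if c.isdigit() else c for c in cc[1:len(cc) - 4])
--   return cc[:1] + middle + cc[-4:]
-- ===== Notes on version B (the rewrite author's own statement) =====
-- stated objective: simpler
-- what changed: Replaces the full-string enumerate loop (with string += and a per-character range-membership test) by slicing into prefix/middle/suffix and masking digits only in the middle slice via join.
import Mathlib
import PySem

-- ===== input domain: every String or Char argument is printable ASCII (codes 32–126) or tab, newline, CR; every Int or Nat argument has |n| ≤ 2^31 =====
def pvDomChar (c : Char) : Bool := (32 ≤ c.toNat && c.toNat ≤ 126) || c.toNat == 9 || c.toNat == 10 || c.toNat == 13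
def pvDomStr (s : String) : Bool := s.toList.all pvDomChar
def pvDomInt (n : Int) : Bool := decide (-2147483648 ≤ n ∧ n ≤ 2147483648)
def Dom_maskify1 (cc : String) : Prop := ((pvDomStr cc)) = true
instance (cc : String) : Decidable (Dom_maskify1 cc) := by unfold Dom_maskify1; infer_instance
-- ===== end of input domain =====

-- B masks via slice decomposition (prefix/middle/suffix) instead of A's enumerate loop with a range-membership test; objective: simpler.

-- ===== PORT A =====
-- literal transliteration: guard, then enumerate fold appending one char at a time,
-- masking when c.isdigit() and i ∈ range(1, len-4)
def maskify1 (cc : String) : String :=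
  let cs := cc.toList
  if cs.length < 6 then cc
  else
    let maskRange := PySem.List.pyRange 1 ((cs.length : Int) - 4) 1
    let result := (PySem.List.enumerate cs 0).foldl
      (fun r (p : Int × Char) =>
        r ++ [if PySem.Chars.isdigit p.2 && maskRange.contains p.1 then '#' else p.2]) []
    String.ofList result

-- ===== PORT B =====
def maskify1_alt (cc : String) : String :=
  let cs := cc.toList
  if cs.length < 6 then cc
  else
    let middle := (PySem.List.slice cs (some 1) (some ((cs.length : Int) - 4))).map
      (fun c => if PySem.Chars.isdigit c then '#' else c)
    String.ofList (PySem.List.slice cs none (some 1) ++ middle ++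
      PySem.List.slice cs (some (-4)) none)

-- ===== PRECONDITION & SPEC =====
def Spec_maskify1 (cc : String) (out : String) : Prop := out = maskify1_alt cc
instance (cc : String) (out : String) : Decidable (Spec_maskify1 cc out) := by unfold Spec_maskify1; infer_instance

-- ===== CLAIM (what is proved, stated in full; the proofs are below) =====
def Claim_equal_maskify1 : Prop := ∀ (cc : String), Dom_maskify1 cc → Spec_maskify1 cc (maskify1 cc)

-- ===== LEMMAS AND PROOFS =====

-- middle segment: every index in enumerate mid s is inside [1, n-4), so A's map masks each digit
lemma map_enum_mid (n : Int) (mid : List Char) (s : Int)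
    (h1 : 1 ≤ s) (h2 : s + mid.length ≤ n - 4) :
    (PySem.List.enumerate mid s).map
      (fun p : Int × Char =>
        if PySem.Chars.isdigit p.2 && (PySem.List.pyRange 1 (n - 4) 1).contains p.1 then '#' else p.2)
    = mid.map (fun c => if PySem.Chars.isdigit c then '#' else c) := by
  induction mid generalizing s with
  | nil => rfl
  | cons c cs ih =>
    simp only [PySem.List.enumerate_cons, List.map_cons, List.length_cons] at *
    congr 1
    · have hc : (PySem.List.pyRange 1 (n - 4) 1).contains s = true := by
        simp [PySem.List.mem_pyRange_one]; omega
      rw [hc]; simp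
    · exact ih (s + 1) (by omega) (by push_cast at h2 ⊢; omega)

-- suffix segment: indices ≥ n-4 are outside the mask range, chars pass through
lemma map_enum_suf (n : Int) (suf : List Char) (s : Int) (h : n - 4 ≤ s) :
    (PySem.List.enumerate suf s).map
      (fun p : Int × Char =>
        if PySem.Chars.isdigit p.2 && (PySem.List.pyRange 1 (n - 4) 1).contains p.1 then '#' else p.2)
    = suf := by
  induction suf generalizing s with
  | nil => rfl
  | cons c cs ih =>
    simp only [PySem.List.enumerate_cons, List.map_cons]
    congr 1
    · have hc : (PySem.List.pyRange 1 (n - 4) 1).contains s = false := by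
        rw [List.contains_eq_any_beq]
        simp only [List.any_eq_false]
        intro x hx
        rw [PySem.List.mem_pyRange_one] at hx
        simp only [beq_iff_eq]; omega
      rw [hc]; simp
    · exact ih (s + 1) (by omega)

-- full string: A's indexed map equals B's prefix/masked-middle/suffix decomposition
lemma map_enum_full (n : Int) (cs : List Char) (hn : n = (cs.length : Int)) (h : 6 ≤ cs.length) :
    (PySem.List.enumerate cs 0).map
      (fun p : Int × Char =>
        if PySem.Chars.isdigit p.2 && (PySem.List.pyRange 1 (n - 4) 1).contains p.1 then '#' else p.2)
    = cs.take 1 ++ ((cs.drop 1).take (cs.length - 5)).map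
        (fun c => if PySem.Chars.isdigit c then '#' else c) ++ cs.drop (cs.length - 4) := by
  obtain ⟨c0, rest, rfl⟩ : ∃ c0 rest, cs = c0 :: rest := by
    cases cs with
    | nil => simp at h
    | cons a l => exact ⟨a, l, rfl⟩
  simp only [List.length_cons] at h hn ⊢
  have hdrop : (c0 :: rest).drop (rest.length + 1 - 4) = rest.drop (rest.length - 4) := by
    rw [show rest.length + 1 - 4 = (rest.length - 4) + 1 by omega]
    simp
  rw [hdrop]
  simp only [List.drop_succ_cons, List.take_succ_cons, List.take_zero]
  have hrest : rest = rest.take (rest.length + 1 - 5) ++ rest.drop (rest.length - 4) := by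
    rw [show rest.length + 1 - 5 = rest.length - 4 by omega, List.take_append_drop]
  rw [PySem.List.enumerate_cons]
  conv_lhs => rw [hrest]
  rw [PySem.List.enumerate_append, List.map_cons, List.map_append]
  simp only [zero_add]
  have hlen : ((rest.take (rest.length + 1 - 5)).length : Int) = n - 5 := by
    simp; omega
  rw [map_enum_mid n _ 1 le_rfl (by rw [hlen]; omega),
      map_enum_suf n _ _ (by rw [hlen]; omega)]
  -- head char, index 0: not in range(1, n-4)
  have hc : (PySem.List.pyRange 1 (n - 4) 1).contains (0 : Int) = false := by
    rw [List.contains_eq_any_beq]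
    simp only [List.any_eq_false]
    intro x hx
    rw [PySem.List.mem_pyRange_one] at hx
    simp only [beq_iff_eq]; omega
  rw [hc]
  simp

-- ===== VERDICT (by name: the statement is the Claim_ definition above) =====
theorem maskify1_spec : Claim_equal_maskify1 := by
  intro cc _
  unfold Spec_maskify1 maskify1 maskify1_alt
  set cs := cc.toList with hcs
  by_cases hlen : cs.length < 6
  · simp [hlen]
  · simp only [hlen, if_false]
    replace hlen : 6 ≤ cs.length := by omega
    congr 1
    rw [PySem.List.foldl_append_singleton_eq_map]
    have hslice1 : PySem.List.slice cs none (some 1) = cs.take 1 := by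
      simpa using PySem.List.slice_to_natCast cs 1
    have hslice2 : PySem.List.slice cs (some 1) (some ((cs.length : Int) - 4)) =
        (cs.drop 1).take (cs.length - 5) := by
      rw [show ((1:Int)) = ((1:Nat):Int) from by norm_cast,
          show ((cs.length : Int) - 4) = (((cs.length - 4 : Nat)) : Int) from by omega,
          PySem.List.slice_natCast]
      congr 1
    have hslice3 : PySem.List.slice cs (some (-4)) none = cs.drop (cs.length - 4) := by
      simpa using PySem.List.slice_from_neg_ofNat cs 4 (by omega)
    rw [hslice1, hslice2, hslice3]
    exact map_enum_full ((cs.length : Int)) cs rfl hlen
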